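-- pv_equiv track=rewrite | github.com/MahatKC/fat16reader | main.py | little_endian_to_big_endian
-- ===== SOURCE A (Python) =====
-- def little_endian_to_big_endian(little_endian_hex):
--     #receives a string of a hex in little endian representation and returns its big endian representation as a string
--
--     size_in_bytes = len(little_endian_hex)//2
--     big_endian = ""
--     for i in range(1,size_in_bytes+1):
--         index = -i*2
--         if i==1:
--             big_endian += little_endian_hex[index:]
--         else:
--             big_endian += little_endian_hex[index:index+2]
--     return big_endian
-- ===== SOURCE B (Python) =====
-- def little_endian_to_big_endian(little_endian_hex):
--     # reverse the whole string (flips byte order and nibbles), then swap nibbles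
--     # back within each pair; a leftover leading char of odd input drops naturally
--     rev = little_endian_hex[::-1]
--     out = []
--     i = 0
--     while i + 1 < len(rev):
--         out.append(rev[i + 1])
--         out.append(rev[i])
--         i += 2
--     return ''.join(out)
-- ===== Notes on version B (the rewrite author's own statement) =====
-- stated objective: simpler
-- what changed: Replaces A's right-aligned negative-index slice windowing (range over byte count with a special first-iteration slice) by one whole-string reversal followed by a single pairwise swap pass.
import Mathlib
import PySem

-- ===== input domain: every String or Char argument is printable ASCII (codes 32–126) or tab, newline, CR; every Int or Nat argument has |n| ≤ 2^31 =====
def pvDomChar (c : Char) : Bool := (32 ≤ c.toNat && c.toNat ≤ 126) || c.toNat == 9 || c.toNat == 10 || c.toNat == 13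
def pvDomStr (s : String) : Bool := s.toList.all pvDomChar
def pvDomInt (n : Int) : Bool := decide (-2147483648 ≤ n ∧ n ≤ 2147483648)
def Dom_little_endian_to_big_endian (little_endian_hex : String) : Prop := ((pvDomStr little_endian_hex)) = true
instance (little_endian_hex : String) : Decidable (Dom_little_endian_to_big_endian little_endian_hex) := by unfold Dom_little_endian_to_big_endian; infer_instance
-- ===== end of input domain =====

-- B replaces A's right-aligned negative-index slice windowing by one whole-string
-- reversal followed by a pairwise swap pass (objective: simpler).

-- ===== PORT A =====
def little_endian_to_big_endian (little_endian_hex : String) : String :=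
  let cs := little_endian_hex.toList
  let size_in_bytes : Nat := cs.length / 2
  let big_endian : List Char :=
    (PySem.List.pyRange 1 ((size_in_bytes : Int) + 1) 1).foldl (fun acc i =>
      let index : Int := -i * 2
      if i = 1 then acc ++ PySem.List.slice cs (some index) none
      else acc ++ PySem.List.slice cs (some index) (some (index + 2))) []
  String.ofList big_endian

-- ===== PORT B =====
-- the while-loop of Source B consuming two chars of `rev` per step
def swapPairs : List Char → List Char
  | a :: b :: rest => b :: a :: swapPairs rest
  | _ => []

def little_endian_to_big_endian_alt (little_endian_hex : String) : String :=
  String.ofList (swapPairs little_endian_hex.toList.reverse)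

-- ===== PRECONDITION & SPEC =====
def Spec_little_endian_to_big_endian (little_endian_hex : String) (out : String) : Prop := out = little_endian_to_big_endian_alt little_endian_hex
instance (little_endian_hex : String) (out : String) : Decidable (Spec_little_endian_to_big_endian little_endian_hex out) := by unfold Spec_little_endian_to_big_endian; infer_instance

-- ===== CLAIM (what is proved, stated in full; the proofs are below) =====
def Claim_equal_little_endian_to_big_endian : Prop := ∀ (little_endian_hex : String), Dom_little_endian_to_big_endian little_endian_hex → Spec_little_endian_to_big_endian little_endian_hex (little_endian_to_big_endian little_endian_hex)

-- ===== LEMMAS AND PROOFS =====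

-- A's loop at the List Char level
def leChunks (cs : List Char) : List Char :=
  (PySem.List.pyRange 1 ((cs.length / 2 : Nat) + 1) 1).foldl (fun acc i =>
    let index : Int := -i * 2
    if i = 1 then acc ++ PySem.List.slice cs (some index) none
    else acc ++ PySem.List.slice cs (some index) (some (index + 2))) []

theorem leChunks_short (cs : List Char) (h : cs.length ≤ 1) : leChunks cs = [] := by
  unfold leChunks
  have h2 : cs.length / 2 = 0 := by omega
  rw [h2]
  rw [PySem.List.pyRange_one_eq_nil (by norm_num)]
  rfl

theorem swapPairs_short (l : List Char) (h : l.length ≤ 1) : swapPairs l = [] := by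
  match l with
  | [] => rfl
  | [x] => rfl
  | x :: y :: r => simp at h

theorem sliceWin (l : List Char) (a b : Char) (k : Nat) (hk1 : 1 ≤ k) (hk2 : 2 * k ≤ l.length) :
    PySem.List.slice (l ++ [a, b]) (some (-((k : Int) + 1) * 2)) (some (-((k : Int) + 1) * 2 + 2)) =
    (l.drop (l.length - 2 * k)).take 2 := by
  have e1 : (-((k : Int) + 1) * 2) = -((2 * k + 2 : Nat) : Int) := by push_cast; ring
  have e2 : (-((k : Int) + 1) * 2 + 2) = -((2 * k : Nat) : Int) := by push_cast; ring
  rw [e2, e1]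
  simp only [PySem.List.slice, PySem.List.clampIdx_neg_natCast _ _ (by omega : 0 < 2 * k + 2),
    PySem.List.clampIdx_neg_natCast _ _ (by omega : 0 < 2 * k)]
  have hlen : (l ++ [a, b]).length = l.length + 2 := by simp
  rw [hlen]
  have h1 : l.length + 2 - (2 * k + 2) = l.length - 2 * k := by omega
  have h2 : l.length + 2 - 2 * k - (l.length - 2 * k) = 2 := by omega
  rw [h1, h2]
  rw [List.drop_append_of_le_length (by omega)]
  rw [List.take_append_of_le_length (by simp; omega)]

theorem chunkLk (l : List Char) (k : Nat) (hk1 : 2 ≤ k) (hk2 : 2 * k ≤ l.length) :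
    PySem.List.slice l (some (-(k : Int) * 2)) (some (-(k : Int) * 2 + 2)) =
    (l.drop (l.length - 2 * k)).take 2 := by
  have e3 : (-(k : Int) * 2) = -((2 * k : Nat) : Int) := by push_cast; ring
  have e4 : (-(k : Int) * 2 + 2) = -((2 * k - 2 : Nat) : Int) := by omega
  rw [e4, e3]
  simp only [PySem.List.slice, PySem.List.clampIdx_neg_natCast _ _ (by omega : 0 < 2 * k),
    PySem.List.clampIdx_neg_natCast _ _ (by omega : 0 < 2 * k - 2)]
  have : l.length - (2 * k - 2) - (l.length - 2 * k) = 2 := by omega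
  rw [this]

theorem leChunks_eq_flatMap (cs : List Char) :
    leChunks cs = (PySem.List.pyRange 1 ((cs.length / 2 : Nat) + 1) 1).flatMap (fun i =>
      if i = 1 then PySem.List.slice cs (some (-i * 2)) none
      else PySem.List.slice cs (some (-i * 2)) (some (-i * 2 + 2))) := by
  unfold leChunks
  have h : (fun (acc : List Char) (i : Int) =>
      let index : Int := -i * 2
      if i = 1 then acc ++ PySem.List.slice cs (some index) none
      else acc ++ PySem.List.slice cs (some index) (some (index + 2))) =
      (fun acc i => acc ++ (if i = 1 then PySem.List.slice cs (some (-i * 2)) none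
      else PySem.List.slice cs (some (-i * 2)) (some (-i * 2 + 2)))) := by
    funext acc i
    by_cases hi : i = 1 <;> simp [hi]
  rw [h, PySem.List.foldl_append_eq_flatMap]
  simp

theorem leChunks_step (l : List Char) (a b : Char) :
    leChunks (l ++ [a, b]) = a :: b :: leChunks l := by
  rw [leChunks_eq_flatMap, leChunks_eq_flatMap]
  have hlen : (l ++ [a, b]).length = l.length + 2 := by simp
  rw [hlen]
  have hn : (l.length + 2) / 2 = l.length / 2 + 1 := by omega
  rw [hn]
  set N := l.length / 2 with hN
  -- split off i = 1
  rw [PySem.List.pyRange_one_append 1 2 ((N + 1 : Nat) + 1) (by norm_num) (by push_cast; omega)]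
  rw [List.flatMap_append]
  have hr12 : PySem.List.pyRange 1 2 = [1] := rfl
  rw [hr12]
  have hfirst : (List.flatMap (fun i =>
      if i = 1 then PySem.List.slice (l ++ [a, b]) (some (-i * 2))
      else PySem.List.slice (l ++ [a, b]) (some (-i * 2)) (some (-i * 2 + 2))) [1]) = [a, b] := by
    simp only [List.flatMap_cons, List.flatMap_nil, List.append_nil]
    rw [show (-(1 : Int) * 2) = -((2 : Nat) : Int) by norm_num]
    rw [PySem.List.slice_from_neg_natCast _ 2 (by omega)]
    rw [hlen]
    have : l.length + 2 - 2 = l.length := by omega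
    rw [this]
    exact List.drop_left
  rw [hfirst]
  -- tail ranges as maps over List.range N
  have e1 : (((N + 1 : Nat) : Int) + 1 - 2).toNat = N := by omega
  have e2 : (((N : Nat) : Int) + 1 - 1).toNat = N := by omega
  have ht1 : PySem.List.pyRange 2 ((N + 1 : Nat) + 1) = (List.range N).map (fun k : Nat => 2 + (k : Int)) := by
    rw [PySem.List.pyRange_one, e1]
  have ht2 : PySem.List.pyRange 1 ((N : Nat) + 1) = (List.range N).map (fun k : Nat => 1 + (k : Int)) := by
    rw [PySem.List.pyRange_one, e2]
  rw [ht1, ht2, List.flatMap_map, List.flatMap_map]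
  simp only [List.cons_append, List.nil_append]
  refine congrArg (fun X => a :: b :: X) ?_
  apply List.flatMap_congr
  intro k hk
  have hkN : k < N := List.mem_range.mp hk
  have h2k : 2 * (k + 1) ≤ l.length := by omega
  have hne : (2 + (k : Int)) ≠ 1 := by omega
  rw [if_neg hne]
  have hform : (-(2 + (k : Int)) * 2) = -(((k + 1 : Nat) : Int) + 1) * 2 := by push_cast; ring
  rw [hform]
  rw [sliceWin l a b (k + 1) (by omega) h2k]
  by_cases hk0 : k = 0
  · subst hk0
    norm_num
    rw [PySem.List.slice_from_neg_ofNat l 2 (by norm_num)]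
    rw [List.take_of_length_le (by simp; omega)]
  · have hne2 : (1 + (k : Int)) ≠ 1 := by omega
    rw [if_neg hne2]
    have hform2 : (-(1 + (k : Int)) * 2) = -(((k + 1 : Nat) : Int)) * 2 := by push_cast; ring
    rw [hform2]
    rw [chunkLk l (k + 1) (by omega) h2k]


theorem leChunks_eq_swapPairs : ∀ (L : Nat) (cs : List Char), cs.length ≤ L →
    leChunks cs = swapPairs cs.reverse := by
  intro L
  induction L with
  | zero =>
      intro cs h
      rw [leChunks_short cs (by omega), swapPairs_short _ (by simp; omega)]
  | succ L ih =>
      intro cs h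
      match hr : cs.reverse with
      | [] =>
          have : cs = [] := by simpa using congrArg List.reverse hr
          subst this
          rw [leChunks_short _ (by simp)]; rfl
      | [x] =>
          have : cs = [x] := by simpa using congrArg List.reverse hr
          subst this
          rw [leChunks_short _ (by simp)]; rfl
      | x :: y :: t =>
          have hcs : cs = t.reverse ++ [y, x] := by
            have := congrArg List.reverse hr
            simpa using this
          have hlen : t.reverse.length ≤ L := by
            have := congrArg List.length hcs
            simp at this ⊢
            omega
          rw [hcs, leChunks_step, ih _ hlen]
          simp [swapPairs]

-- ===== VERDICT (by name: the statement is the Claim_ definition above) =====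
theorem little_endian_to_big_endian_spec : Claim_equal_little_endian_to_big_endian := by
  intro s _
  unfold Spec_little_endian_to_big_endian little_endian_to_big_endian little_endian_to_big_endian_alt
  have := leChunks_eq_swapPairs s.toList.length s.toList le_rfl
  unfold leChunks at this
  simp only []
  rw [this]
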